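-- pv_equiv track=rewrite | github.com/seifreed/r2inspect | r2inspect/domain/formats/import_analysis.py | find_max_risk_score
-- ===== SOURCE A (Python) =====
-- def find_max_risk_score(
--     func_name: str, categories: dict[str, dict[str, tuple[int, str]]]
-- ) -> tuple[int, list[str]]:
--     max_score = 0
--     tags: list[str] = []
--     for api_dict in categories.values():
--         for api_name, (score, tag) in api_dict.items():
--             if api_name in func_name:
--                 if score > max_score:
--                     max_score = score
--                     tags = [tag]
--                 elif score == max_score:
--                     tags.append(tag)
--     return max_score, tags
-- ===== SOURCE B (Python) =====
-- def find_max_risk_score(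
--     func_name: str, categories: dict[str, dict[str, tuple[int, str]]]
-- ) -> tuple[int, list[str]]:
--     matches = [
--         (score, tag)
--         for api_dict in categories.values()
--         for api_name, (score, tag) in api_dict.items()
--         if api_name in func_name
--     ]
--     max_score = max([0, *(s for s, _ in matches)])
--     tags = [t for s, t in matches if s == max_score]
--     return max_score, tags
-- ===== Notes on version B (the rewrite author's own statement) =====
-- stated objective: simpler
-- what changed: Replaces the running-best mutation (conditional reset/append of the tag list inside nested loops) by materializing the matching (score, tag) pairs once and then two declarative passes: a max with a 0 floor and a filter for tags.
import Mathlib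
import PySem

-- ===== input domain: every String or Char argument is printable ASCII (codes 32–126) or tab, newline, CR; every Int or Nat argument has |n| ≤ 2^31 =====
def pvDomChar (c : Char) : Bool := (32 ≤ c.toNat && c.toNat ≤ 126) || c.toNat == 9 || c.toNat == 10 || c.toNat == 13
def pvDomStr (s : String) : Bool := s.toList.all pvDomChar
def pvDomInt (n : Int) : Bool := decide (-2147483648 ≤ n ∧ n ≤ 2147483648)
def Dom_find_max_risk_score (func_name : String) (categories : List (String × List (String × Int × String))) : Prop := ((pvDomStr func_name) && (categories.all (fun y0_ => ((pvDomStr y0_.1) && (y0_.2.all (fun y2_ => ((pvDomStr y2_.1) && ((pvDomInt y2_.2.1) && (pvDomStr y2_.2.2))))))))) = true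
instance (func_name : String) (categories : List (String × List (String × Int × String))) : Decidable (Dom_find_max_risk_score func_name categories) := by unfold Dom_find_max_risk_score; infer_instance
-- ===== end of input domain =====

-- B replaces A's running-best mutation by materializing the matching (score, tag) pairs and two declarative passes (max with 0 floor, then a filter); same cost, simpler decomposition.


-- ===== PORT A =====
-- literal port: running max_score/tags state mutated across the nested loops
def find_max_risk_score (func_name : String) (categories : List (String × List (String × Int × String))) : Int × List String :=
  categories.foldl (fun st cat =>
    cat.2.foldl (fun st item =>
      if PySem.Str.isIn item.1 func_name then
        if item.2.1 > st.1 then (item.2.1, [item.2.2])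
        else if item.2.1 == st.1 then (st.1, st.2 ++ [item.2.2])
        else st
      else st) st) ((0 : Int), ([] : List String))

-- ===== PORT B =====
-- literal port of Source B: matches comprehension, then max([0, *scores]), then a tag filter
def find_max_risk_score_alt (func_name : String) (categories : List (String × List (String × Int × String))) : Int × List String :=
  let ms : List (Int × String) :=
    categories.flatMap (fun cat =>
      (cat.2.filter (fun item => PySem.Str.isIn item.1 func_name)).map (fun item => item.2))
  let max_score : Int := (ms.map Prod.fst).foldl max 0
  let tags : List String := (ms.filter (fun p => p.1 == max_score)).map Prod.snd
  (max_score, tags)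

-- ===== PRECONDITION & SPEC =====
def Spec_find_max_risk_score (func_name : String) (categories : List (String × List (String × Int × String))) (out : Int × List String) : Prop := out = find_max_risk_score_alt func_name categories
instance (func_name : String) (categories : List (String × List (String × Int × String))) (out : Int × List String) : Decidable (Spec_find_max_risk_score func_name categories out) := by unfold Spec_find_max_risk_score; infer_instance

-- ===== CLAIM (what is proved, stated in full; the proofs are below) =====
def Claim_equal_find_max_risk_score : Prop := ∀ (func_name : String) (categories : List (String × List (String × Int × String))), Dom_find_max_risk_score func_name categories → Spec_find_max_risk_score func_name categories (find_max_risk_score func_name categories)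

-- ===== LEMMAS AND PROOFS =====

-- A's step on an already-matched (score, tag) pair
def pvStep (st : Int × List String) (p : Int × String) : Int × List String :=
  if p.1 > st.1 then (p.1, [p.2])
  else if p.1 == st.1 then (st.1, st.2 ++ [p.2])
  else st

-- invariant of A's running fold: final max is the fold of max, tags are the tags of final-max pairs
-- (prefix tags ts survive exactly when the max never increases)
theorem pvStep_fold (l : List (Int × String)) (m : Int) (ts : List String) :
    l.foldl pvStep (m, ts) =
      ((l.map Prod.fst).foldl max m,
       (if (l.map Prod.fst).foldl max m = m then ts else []) ++
         (l.filter (fun p => p.1 == (l.map Prod.fst).foldl max m)).map Prod.snd) := by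
  induction l generalizing m ts with
  | nil => simp
  | cons p t ih =>
    obtain ⟨s, tag⟩ := p
    have hmax : ∀ a : Int, (t.map Prod.fst).foldl max a ≥ a := by
      intro a; exact (PySem.List.le_foldl_max (t.map Prod.fst) a).1
    simp only [List.foldl_cons, List.map_cons, pvStep]
    rcases lt_trichotomy m s with h | h | h
    · have hgt : s > m := h
      rw [if_pos hgt, ih s [tag]]
      have hM : max m s = s := by omega
      simp only [hM]
      have hMs := hmax s
      have hMne : (t.map Prod.fst).foldl max s ≠ m := by omega
      simp only [List.filter_cons, beq_iff_eq, hMne]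
      by_cases he : (t.map Prod.fst).foldl max s = s
      · simp [he]
      · have : ¬ (s = (t.map Prod.fst).foldl max s) := fun hc => he hc.symm
        simp [he, this]
    · subst h
      rw [if_neg (lt_irrefl m), if_pos (beq_self_eq_true m), ih m (ts ++ [tag])]
      have hM : max m m = m := max_self m
      simp only [hM]
      simp only [List.filter_cons, beq_iff_eq]
      by_cases he : (t.map Prod.fst).foldl max m = m
      · simp [he]
      · have : ¬ (m = (t.map Prod.fst).foldl max m) := fun hc => he hc.symm
        simp [he, this]
    · have h1 : ¬ s > m := by omega
      have h2 : (s == m) = false := by simp; omega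
      rw [if_neg h1, h2]
      simp only [Bool.false_eq_true, if_false]
      rw [ih m ts]
      have hM : max m s = m := by omega
      simp only [hM]
      have hMm := hmax m
      have : ¬ (s = (t.map Prod.fst).foldl max m) := by omega
      simp [this]

-- the guarded fold over all items is the plain fold over the filtered matches
theorem pvGuard_filter (func_name : String) (l : List (String × Int × String)) (st : Int × List String) :
    l.foldl (fun st item =>
      if PySem.Str.isIn item.1 func_name then
        if item.2.1 > st.1 then (item.2.1, [item.2.2])
        else if item.2.1 == st.1 then (st.1, st.2 ++ [item.2.2])
        else st
      else st) st
    = ((l.filter (fun item => PySem.Str.isIn item.1 func_name)).map (fun item => item.2)).foldl pvStep st := by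
  induction l generalizing st with
  | nil => rfl
  | cons x t ih =>
    simp only [List.foldl_cons, List.filter_cons]
    rw [ih]
    by_cases h : PySem.Str.isIn x.1 func_name
    · rw [if_pos h, if_pos h, List.map_cons, List.foldl_cons]
      rfl
    · rw [if_neg h, if_neg h]

-- A's nested fold is the fold over the concatenated matched pairs
theorem pvA_eq_fold_matches (func_name : String) (categories : List (String × List (String × Int × String))) :
    find_max_risk_score func_name categories =
      (categories.flatMap (fun cat =>
        (cat.2.filter (fun item => PySem.Str.isIn item.1 func_name)).map (fun item => item.2))).foldl
        pvStep ((0 : Int), ([] : List String)) := by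
  unfold find_max_risk_score
  rw [List.foldl_flatMap]
  congr 1
  funext st cat
  exact pvGuard_filter func_name cat.2 st

-- ===== VERDICT (by name: the statement is the Claim_ definition above) =====
theorem find_max_risk_score_spec : Claim_equal_find_max_risk_score := by
  intro func_name categories _
  unfold Spec_find_max_risk_score find_max_risk_score_alt
  rw [pvA_eq_fold_matches, pvStep_fold]
  simp
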